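-- pv_equiv track=rewrite | github.com/Gongman41/TIL | algorithm/4837_부분집합의_합/bit_set_pl.py | f
-- ===== SOURCE A (Python) =====
-- def f(arr,N, K):
--     arr_n = len(arr)
--     set_count = 0
--     for i in range(1<<arr_n): # 모든 부분집합 생성. 10진수가 아닌 2진수로 생각.1<<N 은 2^N을 의미. 등비수열의 합 ㅇㅇ
--         s = 0
--         count = 0
--         for j in range(arr_n):# 모든 부분집합 각각의의 모든 원소 계산
--             if i & (1<<j):#i의 j번 비트가 1인 경우 == 해당 원소가 현재 부분집합에 속하는지를 나타냄
--                 s += arr[j] #모든 부분집합 각각의 합계, 원소개수 저장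
--                 count += 1
--         if s == K and count == N:
--             set_count+=1 #조건과 맞으면 +1
--     return set_count
-- ===== SOURCE B (Python) =====
-- def f(arr, N, K):
--     # Knapsack-style DP over (chosen-count, running-sum) states instead of
--     # enumerating all 2^n bitmasks; cost is proportional to the number of
--     # distinct reachable states instead of always 2^n.
--     states = {(0, 0): 1}
--     for x in arr:
--         nxt = dict(states)
--         for (c, s), v in states.items():
--             key = (c + 1, s + x)
--             nxt[key] = nxt.get(key, 0) + v
--         states = nxt
--     return states.get((N, K), 0)
-- ===== Notes on version B (the rewrite author's own statement) =====
-- stated objective: alternative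
-- what changed: A enumerates all 2^n bitmask subsets and re-scans the list for each; B does a single left-to-right knapsack-style DP over a dict of (chosen-count, running-sum) states, then looks up (N, K).
import Mathlib
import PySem

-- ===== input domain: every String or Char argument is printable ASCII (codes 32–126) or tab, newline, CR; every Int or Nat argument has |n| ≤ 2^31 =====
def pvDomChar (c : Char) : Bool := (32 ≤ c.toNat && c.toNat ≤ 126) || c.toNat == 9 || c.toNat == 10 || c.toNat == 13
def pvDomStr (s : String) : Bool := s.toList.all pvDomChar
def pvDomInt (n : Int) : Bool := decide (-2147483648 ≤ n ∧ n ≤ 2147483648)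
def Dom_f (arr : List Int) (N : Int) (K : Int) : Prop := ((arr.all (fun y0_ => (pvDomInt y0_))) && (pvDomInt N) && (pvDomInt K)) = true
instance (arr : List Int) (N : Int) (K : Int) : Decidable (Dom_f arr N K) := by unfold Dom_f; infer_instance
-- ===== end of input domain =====

-- B replaces A's enumeration of all 2^n bitmask subsets by a knapsack-style DP
-- over a dict of (chosen-count, running-sum) states.

-- ===== PORT A =====
def f (arr : List Int) (N : Int) (K : Int) : Int :=
  let arr_n := arr.length
  (PySem.List.pyRange 0 ((1 : Int) <<< arr_n) 1).foldl (fun set_count i =>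
    let sc :=
      (PySem.List.pyRange 0 (arr_n : Int) 1).foldl
        (fun (sc : Int × Int) j =>
          if PySem.Int.band i ((1 : Int) <<< j.toNat) ≠ 0 then
            (sc.1 + PySem.List.pyGetD arr j 0, sc.2 + 1)
          else sc) (0, 0)
    if sc.1 = K ∧ sc.2 = N then set_count + 1 else set_count) 0

-- ===== PORT B =====
-- one DP step: fold over the items of the current state dict, adding each
-- state's ways to the (count+1, sum+x) entry of a copy of the dict
def dpStep (d : PySem.Dict (Int × Int) Int) (x : Int) : PySem.Dict (Int × Int) Int :=
  d.items.foldl (fun nd p =>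
    nd.insert (p.1.1 + 1, p.1.2 + x) (nd.getD (p.1.1 + 1, p.1.2 + x) 0 + p.2)) d

def f_alt (arr : List Int) (N : Int) (K : Int) : Int :=
  (arr.foldl dpStep (PySem.Dict.ofList [(((0 : Int), (0 : Int)), (1 : Int))])).getD (N, K) 0

-- ===== PRECONDITION & SPEC =====
def Spec_f (arr : List Int) (N : Int) (K : Int) (out : Int) : Prop := out = f_alt arr N K
instance (arr : List Int) (N : Int) (K : Int) (out : Int) : Decidable (Spec_f arr N K out) := by unfold Spec_f; infer_instance

-- ===== CLAIM (what is proved, stated in full; the proofs are below) =====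
def Claim_equal_f : Prop := ∀ (arr : List Int) (N : Int) (K : Int), Dom_f arr N K → Spec_f arr N K (f arr N K)

-- ===== LEMMAS AND PROOFS =====

-- the common specification both programs compute: the number of ways to pick
-- n elements of arr (by position) summing to k
def cnt : List Int → Int → Int → Int
  | [], n, k => if n = 0 ∧ k = 0 then 1 else 0
  | x :: xs, n, k => cnt xs n k + cnt xs (n - 1) (k - x)

-- (sum, count) of the elements of ys selected by the bits of the mask m
def sel : List Int → Nat → Int × Int
  | [], _ => (0, 0)
  | y :: ys, m =>
    let p := sel ys (m / 2)
    if m % 2 = 1 then (p.1 + y, p.2 + 1) else p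

-- A side ------------------------------------------------------------------

lemma bit_test (m s : Nat) :
    (PySem.Int.band (m : Int) ((1 : Int) <<< s) ≠ 0) ↔ ((m >>> s) % 2 = 1) := by
  have h1 : (1 : Int) <<< s = ((2 ^ s : Nat) : Int) := by
    rw [Int.shiftLeft_eq]; push_cast; ring
  have h3 : m.testBit s = decide ((m >>> s) % 2 = 1) := by
    have h := Nat.testBit_shiftRight (x := m) (i := s) (j := 0)
    simp only [Nat.add_zero] at h
    rw [← h, Nat.testBit_zero]
  rw [h1, PySem.Int.band_natCast, Nat.and_two_pow m s, h3]
  by_cases hb : (m >>> s) % 2 = 1 <;> simp [hb]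

lemma inner_fold (ys : List Int) : ∀ (s m : Nat) (acc : Int × Int),
    (PySem.List.enumerate ys (s : Int)).foldl
      (fun (sc : Int × Int) (p : Int × Int) =>
        if PySem.Int.band (m : Int) ((1 : Int) <<< p.1.toNat) ≠ 0 then
          (sc.1 + p.2, sc.2 + 1)
        else sc) acc
    = (acc.1 + (sel ys (m >>> s)).1, acc.2 + (sel ys (m >>> s)).2) := by
  induction ys with
  | nil => intro s m acc; simp [PySem.List.enumerate_nil, sel]
  | cons y ys ih =>
    intro s m acc
    rw [PySem.List.enumerate_cons, List.foldl_cons]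
    have hcast : ((s : Int) + 1) = ((s + 1 : Nat) : Int) := by push_cast; ring
    rw [hcast, ih (s + 1) m]
    have htn : ((s : Int)).toNat = s := Int.toNat_natCast s
    have hrec : m >>> (s + 1) = (m >>> s) / 2 := Nat.shiftRight_succ m s
    rw [htn, hrec]
    by_cases hb : (m >>> s) % 2 = 1
    · rw [if_pos ((bit_test m s).mpr hb)]
      simp only [sel, hb, if_pos]
      exact Prod.ext (by ring) (by ring)
    · rw [if_neg (fun hc => hb ((bit_test m s).mp hc))]
      simp only [sel, hb]
      simp

lemma countP_double (c : Nat) (P : Nat → Bool) :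
    (List.range (2 * c)).countP P
      = (List.range c).countP (fun q => P (2 * q))
        + (List.range c).countP (fun q => P (2 * q + 1)) := by
  induction c with
  | zero => simp
  | succ c ih =>
    have h2 : 2 * (c + 1) = (2 * c + 1) + 1 := by ring
    rw [h2, List.range_succ, List.range_succ, List.range_succ]
    simp only [List.countP_append, List.countP_singleton, ih]
    omega

lemma mask_count (xs : List Int) : ∀ N K : Int,
    (((List.range (2 ^ xs.length)).countP (fun m => decide (sel xs m = (K, N)))) : Int)
      = cnt xs N K := by
  induction xs with
  | nil =>
    intro N K
    simp only [List.length_nil, pow_zero, List.range_one, List.countP_singleton, cnt]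
    by_cases h : N = 0 ∧ K = 0
    · simp [sel, h.1, h.2]
    · have : ¬ ((0 : Int) = K ∧ (0 : Int) = N) := by
        intro hc; exact h ⟨hc.2.symm, hc.1.symm⟩
      simp [sel, Prod.ext_iff, this, h]
  | cons x xs ih =>
    intro N K
    have hlen : (2 : Nat) ^ (x :: xs).length = 2 * 2 ^ xs.length := by
      simp [List.length_cons]; ring
    rw [hlen, countP_double]
    have heven : ∀ q : Nat, sel (x :: xs) (2 * q) = sel xs q := by
      intro q
      simp [sel, Nat.mul_mod_right, Nat.mul_div_cancel_left q (by norm_num : 0 < 2)]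
    have hodd : ∀ q : Nat, sel (x :: xs) (2 * q + 1)
        = ((sel xs q).1 + x, (sel xs q).2 + 1) := by
      intro q
      have h1 : (2 * q + 1) % 2 = 1 := by omega
      have h2 : (2 * q + 1) / 2 = q := by omega
      simp [sel, h1, h2]
    have he : (List.range (2 ^ xs.length)).countP (fun q => decide (sel (x :: xs) (2 * q) = (K, N)))
        = (List.range (2 ^ xs.length)).countP (fun q => decide (sel xs q = (K, N))) := by
      apply List.countP_congr; intro q _; simp [heven q]
    have ho : (List.range (2 ^ xs.length)).countP (fun q => decide (sel (x :: xs) (2 * q + 1) = (K, N)))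
        = (List.range (2 ^ xs.length)).countP (fun q => decide (sel xs q = (K - x, N - 1))) := by
      apply List.countP_congr; intro q _
      simp only [hodd q, Prod.ext_iff, decide_eq_true_eq]
      omega
    rw [he, ho]
    push_cast
    rw [ih N K, ih (N - 1) (K - x)]
    simp [cnt]

lemma inner_eq_sel (arr : List Int) (m : Nat) :
    (PySem.List.pyRange 0 (arr.length : Int) 1).foldl
      (fun (sc : Int × Int) j =>
        if PySem.Int.band (m : Int) ((1 : Int) <<< j.toNat) ≠ 0 then
          (sc.1 + PySem.List.pyGetD arr j 0, sc.2 + 1)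
        else sc) (0, 0) = sel arr m := by
  have hmap := PySem.List.enumerate_eq_map_pyRange (xs := arr) (d := (0 : Int))
  rw [PySem.List.len_eq] at hmap
  have h0 := inner_fold arr 0 m (0, 0)
  simp only [Nat.cast_zero] at h0
  rw [hmap, List.foldl_map] at h0
  simp only [Nat.shiftRight_zero, zero_add] at h0
  simp only [Int.shiftLeft_natCast_right]
  exact h0

lemma fA_eq_cnt (arr : List Int) (N K : Int) : f arr N K = cnt arr N K := by
  have hsh : (1 : Int) <<< arr.length = ((2 ^ arr.length : Nat) : Int) := by
    rw [Int.shiftLeft_eq]; push_cast; ring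
  show (PySem.List.pyRange 0 ((1 : Int) <<< arr.length) 1).foldl _ 0 = _
  have hbody : ∀ (acc : Int) (i : Int), i ∈ PySem.List.pyRange 0 ((1 : Int) <<< arr.length) 1 →
      (fun (set_count : Int) (i : Int) =>
        let sc :=
          (PySem.List.pyRange 0 (arr.length : Int) 1).foldl
            (fun (sc : Int × Int) j =>
              if PySem.Int.band i ((1 : Int) <<< j.toNat) ≠ 0 then
                (sc.1 + PySem.List.pyGetD arr j 0, sc.2 + 1)
              else sc) (0, 0)
        if sc.1 = K ∧ sc.2 = N then set_count + 1 else set_count) acc i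
      = (fun (set_count : Int) (i : Int) =>
          if sel arr i.toNat = (K, N) then set_count + 1 else set_count) acc i := by
    intro acc i hi
    have h0 : 0 ≤ i := (PySem.List.mem_pyRange_one.mp hi).1
    have hm : ((i.toNat : Nat) : Int) = i := Int.toNat_of_nonneg h0
    simp only []
    rw [← hm, inner_eq_sel arr i.toNat]
    simp only [Int.toNat_natCast, Prod.ext_iff]
  refine Eq.trans (PySem.List.foldl_congr_mem _ _
    (fun (set_count : Int) (i : Int) => if sel arr i.toNat = (K, N) then set_count + 1 else set_count)
    0 hbody) ?_
  rw [hsh, PySem.List.pyRange_zero_nat, List.foldl_map]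
  simp only [Int.toNat_natCast]
  refine Eq.trans (PySem.List.foldl_ite_add_one
    (fun m : Nat => sel arr m = (K, N)) (List.range (2 ^ arr.length)) 0) ?_
  rw [zero_add]
  exact mask_count arr N K

-- B side ------------------------------------------------------------------

lemma inner_dp (x a b : Int) : ∀ (l : List ((Int × Int) × Int)) (nd : PySem.Dict (Int × Int) Int),
    (l.foldl (fun nd p =>
        nd.insert (p.1.1 + 1, p.1.2 + x) (nd.getD (p.1.1 + 1, p.1.2 + x) 0 + p.2)) nd).getD (a, b) 0
      = nd.getD (a, b) 0 + ((l.filter (fun p => decide (p.1 = (a - 1, b - x)))).map (·.2)).sum := by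
  intro l
  induction l with
  | nil => intro nd; simp
  | cons p l ih =>
    intro nd
    rw [List.foldl_cons, ih]
    by_cases hp : p.1 = (a - 1, b - x)
    · have hk : (a, b) = (p.1.1 + 1, p.1.2 + x) := by
        rw [hp]; exact Prod.ext (by ring) (by ring)
      rw [List.filter_cons_of_pos (by simp [hp])]
      rw [PySem.Dict.getD_insert, if_pos hk]
      have hnd : nd.getD (p.1.1 + 1, p.1.2 + x) 0 = nd.getD (a, b) 0 := by rw [← hk]
      rw [hnd]
      simp
      ring
    · have hk : (a, b) ≠ (p.1.1 + 1, p.1.2 + x) := by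
        intro hc
        apply hp
        have h1 : a = p.1.1 + 1 := congrArg Prod.fst hc
        have h2 : b = p.1.2 + x := congrArg Prod.snd hc
        exact Prod.ext (by omega) (by omega)
      rw [List.filter_cons_of_neg (by simp [hp])]
      rw [PySem.Dict.getD_insert, if_neg hk]

lemma filter_key_singleton : ∀ (l : List ((Int × Int) × Int)) (k0 : Int × Int) (v : Int),
    (l.map (·.1)).Nodup → (k0, v) ∈ l → l.filter (fun p => decide (p.1 = k0)) = [(k0, v)] := by
  intro l
  induction l with
  | nil => intro k0 v _ hm; simp at hm
  | cons p l ih =>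
    intro k0 v hnd hm
    simp only [List.map_cons, List.nodup_cons] at hnd
    rcases List.mem_cons.mp hm with h | h
    · subst h
      rw [List.filter_cons_of_pos (by simp)]
      have : l.filter (fun p => decide (p.1 = (k0, v).1)) = [] := by
        apply List.filter_eq_nil_iff.mpr
        intro q hq hdec
        apply hnd.1
        have : q.1 = (k0, v).1 := by simpa using hdec
        rw [← this]
        exact List.mem_map.mpr ⟨q, hq, rfl⟩
      simp [this]
    · have hne : p.1 ≠ k0 := by
        intro hc
        apply hnd.1
        have : k0 ∈ l.map (·.1) := List.mem_map.mpr ⟨(k0, v), h, rfl⟩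
        rw [hc]; exact this
      rw [List.filter_cons_of_neg (by simp [hne])]
      exact ih k0 v hnd.2 h

lemma dict_sum (d : PySem.Dict (Int × Int) Int) (k0 : Int × Int) (hnd : d.keys.Nodup) :
    ((d.items.filter (fun p => decide (p.1 = k0))).map (·.2)).sum = d.getD k0 0 := by
  have hkeys : d.keys = d.items.map (·.1) := by simp only [PySem.Dict.keys]
  cases hk : d.get? k0 with
  | none =>
    rw [PySem.Dict.getD_of_get?_eq_none d 0 hk]
    have hnotmem : k0 ∉ d.keys := (PySem.Dict.get?_eq_none_iff_not_mem_keys d k0).mp hk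
    have : d.items.filter (fun p => decide (p.1 = k0)) = [] := by
      apply List.filter_eq_nil_iff.mpr
      intro q hq hdec
      apply hnotmem
      have hq1 : q.1 = k0 := by simpa using hdec
      rw [← hq1]
      exact PySem.Dict.mem_keys_of_mem_items d hq
    simp [this]
  | some v =>
    rw [PySem.Dict.getD_eq_get?_getD, hk]
    have hmem := PySem.Dict.mem_items_of_get?_eq_some d hk
    rw [filter_key_singleton d.items k0 v (by rw [← hkeys]; exact hnd) hmem]
    simp

lemma step_getD (d : PySem.Dict (Int × Int) Int) (x a b : Int) (hnd : d.keys.Nodup) :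
    (dpStep d x).getD (a, b) 0 = d.getD (a, b) 0 + d.getD (a - 1, b - x) 0 := by
  rw [dpStep, inner_dp, dict_sum d (a - 1, b - x) hnd]

lemma step_nodup (d : PySem.Dict (Int × Int) Int) (x : Int) (hnd : d.keys.Nodup) :
    (dpStep d x).keys.Nodup := by
  exact PySem.Dict.nodup_keys_foldl_insert_key d.items
    (fun p => (p.1.1 + 1, p.1.2 + x))
    (fun nd p => nd.getD (p.1.1 + 1, p.1.2 + x) 0 + p.2) d hnd

lemma cnt_snoc (xs : List Int) (x : Int) : ∀ n k : Int,
    cnt (xs ++ [x]) n k = cnt xs n k + cnt xs (n - 1) (k - x) := by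
  induction xs with
  | nil => intro n k; simp [cnt]
  | cons y xs ih =>
    intro n k
    show cnt (y :: (xs ++ [x])) n k = _
    rw [show cnt (y :: (xs ++ [x])) n k = cnt (xs ++ [x]) n k + cnt (xs ++ [x]) (n - 1) (k - y) from rfl]
    rw [ih n k, ih (n - 1) (k - y)]
    rw [show cnt (y :: xs) n k = cnt xs n k + cnt xs (n - 1) (k - y) from rfl,
        show cnt (y :: xs) (n - 1) (k - x) = cnt xs (n - 1) (k - x) + cnt xs (n - 1 - 1) (k - x - y) from rfl]
    rw [show k - y - x = k - x - y from by ring]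
    ring

lemma outer_dp : ∀ (rest : List Int) (d : PySem.Dict (Int × Int) Int) (p : List Int),
    d.keys.Nodup → (∀ a b : Int, d.getD (a, b) 0 = cnt p a b) →
    ∀ a b : Int, (rest.foldl dpStep d).getD (a, b) 0 = cnt (p ++ rest) a b := by
  intro rest
  induction rest with
  | nil => intro d p _ hinv a b; simpa using hinv a b
  | cons x rest ih =>
    intro d p hnd hinv a b
    rw [List.foldl_cons]
    have hnd' := step_nodup d x hnd
    have hinv' : ∀ a b : Int, (dpStep d x).getD (a, b) 0 = cnt (p ++ [x]) a b := by
      intro a b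
      rw [step_getD d x a b hnd, hinv a b, hinv (a - 1) (b - x), cnt_snoc]
    have := ih (dpStep d x) (p ++ [x]) hnd' hinv' a b
    rwa [List.append_assoc, List.singleton_append] at this

lemma fB_eq_cnt (arr : List Int) (N K : Int) : f_alt arr N K = cnt arr N K := by
  have h := outer_dp arr (PySem.Dict.ofList [(((0 : Int), (0 : Int)), (1 : Int))]) []
    (PySem.Dict.nodup_keys_ofList _)
    (by
      intro a b
      show _ = cnt [] a b
      rw [show cnt [] a b = if a = 0 ∧ b = 0 then 1 else 0 from rfl]
      simp [PySem.Dict.ofList, PySem.Dict.update, PySem.Dict.getD_insert, Prod.ext_iff]) N K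
  simpa [f_alt] using h

-- ===== VERDICT (by name: the statement is the Claim_ definition above) =====
theorem f_spec : Claim_equal_f := by
  intro arr N K _
  unfold Spec_f
  rw [fA_eq_cnt, fB_eq_cnt]
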